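-- pv_equiv track=rewrite | github.com/cproctor/qualitative-coding | qualitative_coding/helpers.py | iter_paragraph_lines
-- ===== SOURCE A (Python) =====
-- def iter_paragraph_lines(fh):
--     p_start = 0
--     in_whitespace = False
--     for i, line in enumerate(fh):
--         if line.strip() == "":
--             in_whitespace = True
--         elif in_whitespace:
--             yield p_start, i
--             p_start = i
--             in_whitespace = False
--     yield p_start, i + 1
-- ===== SOURCE B (Python) =====
-- def iter_paragraph_lines(fh):
--     # Two-pass: collect paragraph start indices first, then emit consecutive pairs.
--     lines = list(fh)
--     starts = [0]
--     in_whitespace = False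
--     for i, line in enumerate(lines):
--         if line.strip() == "":
--             in_whitespace = True
--         elif in_whitespace:
--             starts.append(i)
--             in_whitespace = False
--     if lines:
--         yield from zip(starts, starts[1:] + [len(lines)])
-- ===== Notes on version B (the rewrite author's own statement) =====
-- stated objective: alternative
-- what changed: B splits the work into two passes: one scan collects paragraph start indices, then the (start,end) pairs are emitted by zipping consecutive starts, instead of A's single scan that yields while tracking the previous start; B also returns nothing on empty input where A raises NameError.
-- crash fix: On an empty iterable A raises NameError (the final yield references the undefined loop variable i); B yields nothing, i.e. returns []. — e.g. on iter_paragraph_lines([]): A raises UnboundLocalError, B returns []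
import Mathlib
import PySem

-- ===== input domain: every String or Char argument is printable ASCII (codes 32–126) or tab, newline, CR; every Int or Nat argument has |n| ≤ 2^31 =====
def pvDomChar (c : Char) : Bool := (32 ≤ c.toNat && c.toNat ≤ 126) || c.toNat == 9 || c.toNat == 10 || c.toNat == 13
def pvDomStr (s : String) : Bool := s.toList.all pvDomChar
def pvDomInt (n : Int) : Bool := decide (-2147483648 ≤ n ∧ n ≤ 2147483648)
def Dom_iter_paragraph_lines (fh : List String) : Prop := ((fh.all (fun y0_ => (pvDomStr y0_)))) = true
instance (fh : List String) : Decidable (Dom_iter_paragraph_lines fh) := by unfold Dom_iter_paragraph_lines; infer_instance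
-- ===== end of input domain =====

-- B collects paragraph start indices in one pass and zips consecutive starts in a second,
-- instead of A's single yielding scan (alternative decomposition; return value equivalence only).


-- ===== PORT A =====
-- the for-loop of A: state (yielded pairs so far, p_start, in_whitespace); returns them after the loop
def pvLoopA : List (Int × String) → Int → Bool → List (Int × Int) × Int × Bool
  | [], p_start, in_ws => ([], p_start, in_ws)
  | (i, line) :: rest, p_start, in_ws =>
    if PySem.Str.strip line == "" then pvLoopA rest p_start true
    else if in_ws then
      let r := pvLoopA rest i false
      ((p_start, i) :: r.1, r.2)
    else pvLoopA rest p_start in_ws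

def iter_paragraph_lines (fh : List String) : List (Int × Int) :=
  let r := pvLoopA (PySem.List.enumerate fh 0) 0 false
  -- final 'yield p_start, i + 1': on nonempty fh the last enumerate index i satisfies i + 1 = fh.length;
  -- on empty fh Python raises NameError (excluded by Pre_)
  r.1 ++ [(r.2.1, (fh.length : Int))]

-- ===== PORT B =====
-- first pass of B: the paragraph start indices appended after the initial 0
def pvStartsB : List (Int × String) → Bool → List Int
  | [], _ => []
  | (i, line) :: rest, in_ws =>
    if PySem.Str.strip line == "" then pvStartsB rest true
    else if in_ws then i :: pvStartsB rest false
    else pvStartsB rest in_ws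

def iter_paragraph_lines_alt (fh : List String) : List (Int × Int) :=
  let starts : List Int := 0 :: pvStartsB (PySem.List.enumerate fh 0) false
  if fh.isEmpty then []
  else starts.zip (starts.drop 1 ++ [(fh.length : Int)])

-- ===== PRECONDITION & SPEC =====
-- Pre_ excludes only the empty iterable, on which A raises NameError (loop variable i undefined)
def Pre_iter_paragraph_lines (fh : List String) : Prop := fh ≠ []
instance (fh : List String) : Decidable (Pre_iter_paragraph_lines fh) := by unfold Pre_iter_paragraph_lines; infer_instance
def pvWitness_iter_paragraph_lines : List String := ["a", "", "b"]

-- On an empty iterable A raises NameError (its final yield references the undefined loop variable i); B yields nothing, i.e. returns [].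
def Raises_iter_paragraph_lines (fh : List String) : Prop := fh = []
instance (fh : List String) : Decidable (Raises_iter_paragraph_lines fh) := by unfold Raises_iter_paragraph_lines; infer_instance
def pvRaiseWitness_iter_paragraph_lines : List String := []
def pvRaiseWitnessOut_iter_paragraph_lines : List (Int × Int) := []

def Spec_iter_paragraph_lines (fh : List String) (out : List (Int × Int)) : Prop := out = iter_paragraph_lines_alt fh
instance (fh : List String) (out : List (Int × Int)) : Decidable (Spec_iter_paragraph_lines fh out) := by unfold Spec_iter_paragraph_lines; infer_instance

-- ===== CLAIM (what is proved, stated in full; the proofs are below) =====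
def Claim_equal_iter_paragraph_lines : Prop := ∀ (fh : List String), Dom_iter_paragraph_lines fh → Pre_iter_paragraph_lines fh → Spec_iter_paragraph_lines fh (iter_paragraph_lines fh)
def Claim_raises_iter_paragraph_lines : Prop := (∀ (fh : List String), Dom_iter_paragraph_lines fh → Raises_iter_paragraph_lines fh → ¬ Pre_iter_paragraph_lines fh) ∧ (Dom_iter_paragraph_lines (pvRaiseWitness_iter_paragraph_lines) ∧ Raises_iter_paragraph_lines (pvRaiseWitness_iter_paragraph_lines) ∧ iter_paragraph_lines_alt (pvRaiseWitness_iter_paragraph_lines) = pvRaiseWitnessOut_iter_paragraph_lines)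

-- ===== LEMMAS AND PROOFS =====

-- A's loop result, in terms of B's start list: the yielded pairs are consecutive starts,
-- and the final p_start is the last start.
theorem pvLoopA_eq (l : List (Int × String)) : ∀ (p : Int) (w : Bool),
    (pvLoopA l p w).1 = (p :: pvStartsB l w).zip (pvStartsB l w) ∧
    (pvLoopA l p w).2.1 = (p :: pvStartsB l w).getLast (by simp) := by
  induction l with
  | nil => intro p w; simp [pvLoopA, pvStartsB]
  | cons hd rest ih =>
    intro p w
    obtain ⟨i, line⟩ := hd
    by_cases hb : PySem.Str.strip line == ""
    · simpa [pvLoopA, pvStartsB, hb] using ih p true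
    · cases w with
      | false => simpa [pvLoopA, pvStartsB, hb] using ih p false
      | true =>
        have h := ih i false
        simp only [pvLoopA, pvStartsB, hb, if_false, if_true, Bool.false_eq_true]
        refine ⟨?_, ?_⟩
        · simp [h.1]
        · rw [h.2]
          exact (List.getLast_cons (by simp)).symm

-- zipping a nonempty list against its tail extended by L appends exactly (last, L)
theorem zip_tail_append (L : Int) : ∀ (xs : List Int) (h : xs ≠ []),
    xs.zip (xs.tail ++ [L]) = xs.zip xs.tail ++ [(xs.getLast h, L)] := by
  intro xs
  induction xs with
  | nil => intro h; exact absurd rfl h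
  | cons x t ih =>
    intro _
    cases t with
    | nil => simp
    | cons y t' =>
      have := ih (by simp)
      simp only [List.tail_cons] at this
      rw [List.tail_cons, List.cons_append, List.zip_cons_cons, List.zip_cons_cons, this]
      simp [List.getLast_cons]

-- ===== VERDICT (by name: the statement is the Claim_ definition above) =====
theorem iter_paragraph_lines_spec : Claim_equal_iter_paragraph_lines := by
  intro fh _ hpre
  unfold Spec_iter_paragraph_lines iter_paragraph_lines iter_paragraph_lines_alt
  have h := pvLoopA_eq (PySem.List.enumerate fh 0) 0 false
  have hne : fh.isEmpty = false := by
    cases fh with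
    | nil => exact absurd rfl hpre
    | cons _ _ => rfl
  simp only [hne, if_false, Bool.false_eq_true]
  rw [h.1, h.2]
  rw [show ((0 : Int) :: pvStartsB (PySem.List.enumerate fh 0) false).drop 1
        = ((0 : Int) :: pvStartsB (PySem.List.enumerate fh 0) false).tail from rfl]
  exact (zip_tail_append _ _ (by simp)).symm

@[simp]
theorem iter_paragraph_lines_raises : Claim_raises_iter_paragraph_lines := by
  unfold Claim_raises_iter_paragraph_lines
  exact ⟨fun fh _ hr => by simp [Pre_iter_paragraph_lines, Raises_iter_paragraph_lines] at *; exact hr, by decide⟩
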